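-- pv_equiv track=rewrite | github.com/FilipMichalkiewicz/flipper | main.py | _extract_stream_url_from_cmd
-- ===== SOURCE A (Python) =====
-- from typing import Optional
--
-- def _extract_stream_url_from_cmd(cmd: str) -> Optional[str]:
--     if not cmd:
--         return None
--     raw = str(cmd).strip()
--     if raw.startswith("ffmpeg "):
--         raw = raw[7:].strip()
--     for token in raw.replace("\"", " ").split():
--         if token.startswith(("http://", "https://")):
--             return token.strip()
--     if raw.startswith(("http://", "https://")):
--         return raw
--     return None
-- ===== SOURCE B (Python) =====
-- from typing import Optional
--
-- def _extract_stream_url_from_cmd(cmd: str) -> Optional[str]: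
--     if not cmd:
--         return None
--     raw = str(cmd).strip()
--     if raw.startswith("ffmpeg "):
--         raw = raw[7:].strip()
--     # single in-place character scan: walk over runs of separator chars
--     # (whitespace or '"') and token runs; test each token as it is cut out,
--     # without building a replaced string or a token list.
--     i, n = 0, len(raw)
--     while i < n:
--         c = raw[i]
--         if c.isspace() or c == '"':
--             i += 1
--             continue
--         j = i + 1
--         while j < n and not (raw[j].isspace() or raw[j] == '"'):
--             j += 1
--         tok = raw[i:j]
--         if tok.startswith("http://") or tok.startswith("https://"):
--             return tok
--         i = j
--     return None
-- ===== Notes on version B (the rewrite author's own statement) =====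
-- stated objective: alternative
-- what changed: B replaces A's quote-to-space substitution, split() token-list build and rescan by a single in-place index scan that cuts each whitespace- or quote-delimited token out of the string and tests it directly, with no replaced copy, no token list and no dead startswith fallback.
import Mathlib
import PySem

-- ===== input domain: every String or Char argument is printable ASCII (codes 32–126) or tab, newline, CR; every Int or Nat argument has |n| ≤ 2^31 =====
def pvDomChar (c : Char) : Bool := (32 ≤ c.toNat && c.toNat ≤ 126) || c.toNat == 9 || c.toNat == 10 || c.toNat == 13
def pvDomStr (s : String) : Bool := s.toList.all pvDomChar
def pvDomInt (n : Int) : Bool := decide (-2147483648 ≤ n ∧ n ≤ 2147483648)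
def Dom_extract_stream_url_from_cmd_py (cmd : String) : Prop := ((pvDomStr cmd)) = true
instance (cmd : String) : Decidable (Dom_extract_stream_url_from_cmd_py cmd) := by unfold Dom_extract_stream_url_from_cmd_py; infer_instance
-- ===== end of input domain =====

set_option maxRecDepth 2000


-- B replaces A's substitute-then-split()-then-rescan pipeline by one in-place
-- character scan over separator/token runs (objective: alternative; no replaced
-- copy and no token list are built).

-- ===== PORT A =====
-- A's tail: the loop's result if it returned, else the startswith fallback
def pvFallbackA (raw : String) (r : Option String) : Option String :=
  match r with
  | some t => some t
  | none =>
    if PySem.Str.startswith raw "http://" || PySem.Str.startswith raw "https://" then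
      some raw
    else none

-- the for-loop body: first token with an http(s):// prefix, returned stripped
def pvLoopA : List String → Option String
  | [] => none
  | t :: ts =>
    if PySem.Str.startswith t "http://" || PySem.Str.startswith t "https://" then
      some (PySem.Str.strip t)
    else pvLoopA ts

def extract_stream_url_from_cmd_py (cmd : String) : Option String :=
  if cmd = "" then none
  else
    let raw := PySem.Str.strip cmd
    let raw := if PySem.Str.startswith raw "ffmpeg " then
        PySem.Str.strip (PySem.Str.slice raw (some 7) none)
      else raw
    pvFallbackA raw (pvLoopA (PySem.Str.split₀ (PySem.Str.replace raw "\"" " ")))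

-- ===== PORT B =====
-- separator characters of B's scan: whitespace or a double quote
def pvIsSep (c : Char) : Bool := PySem.Chars.isspace c || c == '"'

-- B's while-loop: skip a separator, or cut out the token run starting here,
-- test it, and continue after it
def pvScanB : List Char → Option (List Char)
  | [] => none
  | c :: rest =>
    if pvIsSep c then pvScanB rest
    else
      let tok := c :: rest.takeWhile (fun d => !pvIsSep d)
      if PySem.Chars.startswith tok "http://".toList
          || PySem.Chars.startswith tok "https://".toList then
        some tok
      else pvScanB (rest.dropWhile (fun d => !pvIsSep d))
  termination_by cs => cs.length
  decreasing_by
    all_goals simp only [List.length_cons, Nat.lt_succ_iff]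
    all_goals first
      | exact List.length_dropWhile_le _ _
      | exact Nat.le_refl _

def extract_stream_url_from_cmd_py_alt (cmd : String) : Option String :=
  if cmd = "" then none
  else
    let raw := PySem.Str.strip cmd
    let raw := if PySem.Str.startswith raw "ffmpeg " then
        PySem.Str.strip (PySem.Str.slice raw (some 7) none)
      else raw
    (pvScanB raw.toList).map String.ofList

-- ===== PRECONDITION & SPEC =====
def Spec_extract_stream_url_from_cmd_py (cmd : String) (out : Option String) : Prop := out = extract_stream_url_from_cmd_py_alt cmd
instance (cmd : String) (out : Option String) : Decidable (Spec_extract_stream_url_from_cmd_py cmd out) := by unfold Spec_extract_stream_url_from_cmd_py; infer_instance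

-- ===== CLAIM (what is proved, stated in full; the proofs are below) =====
def Claim_equal_extract_stream_url_from_cmd_py : Prop := ∀ (cmd : String), Dom_extract_stream_url_from_cmd_py cmd → Spec_extract_stream_url_from_cmd_py cmd (extract_stream_url_from_cmd_py cmd)

-- ===== LEMMAS AND PROOFS =====

def pvSub (c : Char) : Char := if c = '"' then ' ' else c

theorem go1 (l : List Char) : ∀ (fuel : Nat) (acc : List Char), l.length ≤ fuel →
    PySem.Chars.replace.go ['"'] [' '] fuel l acc = acc.reverse ++ l.map pvSub := by
  induction l with
  | nil => intro fuel acc _; cases fuel <;> simp [PySem.Chars.replace.go]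
  | cons c t ih =>
    intro fuel acc h
    cases fuel with
    | zero => simp at h
    | succ n =>
      simp only [PySem.Chars.replace.go]
      by_cases hc : c = '"'
      · subst hc
        have := ih n (' ' :: acc) (by simpa using Nat.le_of_succ_le_succ h)
        simp only [List.isPrefixOf] at *
        simp [this, pvSub]
      · have hb : (c == '"') = false := by simpa using hc
        have := ih n (c :: acc) (by simpa using Nat.le_of_succ_le_succ h)
        simp only [List.isPrefixOf] at *
        simp [this, pvSub, hc]
        intro h'
        exact absurd h'.symm hc

theorem pvReplace_eq_map (cs : List Char) :
    PySem.Chars.replace cs ['"'] [' '] = cs.map pvSub := by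
  simp [PySem.Chars.replace, go1 cs cs.length [] (le_refl _)]

def pvSplitTok : List Char → List (List Char)
  | [] => []
  | c :: rest =>
    if PySem.Chars.isspace c then pvSplitTok rest
    else (c :: rest.takeWhile (fun d => !PySem.Chars.isspace d))
        :: pvSplitTok (rest.dropWhile (fun d => !PySem.Chars.isspace d))
  termination_by cs => cs.length
  decreasing_by
    all_goals simp only [List.length_cons, Nat.lt_succ_iff]
    all_goals first
      | exact List.length_dropWhile_le _ _
      | exact Nat.le_refl _

theorem goS (l : List Char) : ∀ (cur : List Char) (acc : List (List Char)),
    PySem.Chars.split₀.go l cur acc = acc.reverse ++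
      (if cur.isEmpty then pvSplitTok l
       else (cur.reverse ++ l.takeWhile (fun d => !PySem.Chars.isspace d))
            :: pvSplitTok (l.dropWhile (fun d => !PySem.Chars.isspace d))) := by
  induction l with
  | nil =>
    intro cur acc
    cases cur <;> simp [PySem.Chars.split₀.go, pvSplitTok]
  | cons c rest ih =>
    intro cur acc
    by_cases hs : PySem.Chars.isspace c
    · rw [show PySem.Chars.split₀.go (c::rest) cur acc =
          (if PySem.Chars.isspace c then
            (if cur.isEmpty then PySem.Chars.split₀.go rest [] acc
             else PySem.Chars.split₀.go rest [] (cur.reverse :: acc))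
           else PySem.Chars.split₀.go rest (c :: cur) acc) from rfl]
      rw [if_pos hs]
      cases cur with
      | nil => simp only [List.isEmpty_nil, if_true, ih, reduceIte]
               rw [pvSplitTok, if_pos hs]
      | cons x xs =>
        have hrw : pvSplitTok (c::rest) = pvSplitTok rest := by
          rw [pvSplitTok]; rw [if_pos hs]
        simp only [List.isEmpty_cons, reduceIte, ih, List.isEmpty_nil]
        simp [List.takeWhile_cons, List.dropWhile_cons, hs, hrw]
    · rw [show PySem.Chars.split₀.go (c::rest) cur acc =
          (if PySem.Chars.isspace c then
            (if cur.isEmpty then PySem.Chars.split₀.go rest [] acc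
             else PySem.Chars.split₀.go rest [] (cur.reverse :: acc))
           else PySem.Chars.split₀.go rest (c :: cur) acc) from rfl]
      rw [if_neg hs, ih]
      rw [pvSplitTok]
      rw [if_neg hs]
      cases cur with
      | nil => simp [List.takeWhile_cons, List.dropWhile_cons, hs]
      | cons x xs => simp [List.takeWhile_cons, List.dropWhile_cons, hs]

theorem pvSplit₀_eq_splitTok (cs : List Char) :
    PySem.Chars.split₀ cs = pvSplitTok cs := by
  simp [PySem.Chars.split₀, goS]

def pvPredC (t : List Char) : Bool :=
  PySem.Chars.startswith t "http://".toList || PySem.Chars.startswith t "https://".toList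

theorem pvIsspace_sub (c : Char) : PySem.Chars.isspace (pvSub c) = pvIsSep c := by
  by_cases h : c = '"' <;> simp [pvSub, pvIsSep, h] <;> decide

theorem pvComp_eq : ((fun d => !PySem.Chars.isspace d) ∘ pvSub) = (fun d => !pvIsSep d) :=
  funext fun d => by simp [Function.comp, pvIsspace_sub]

theorem pvSub_id (c : Char) (h : pvIsSep c = false) : pvSub c = c := by
  have : (c == '"') = false := by
    revert h; simp [pvIsSep]
  simp [pvSub]
  intro h'
  simp [h'] at this

theorem pvMapSub_id (l : List Char) (h : ∀ c ∈ l, pvIsSep c = false) : l.map pvSub = l := by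
  rw [List.map_congr_left (fun c hc => pvSub_id c (h c hc))]
  exact List.map_id l

theorem pvTok_eq (rest : List Char) :
    List.takeWhile (fun d => !PySem.Chars.isspace d) (List.map pvSub rest)
      = List.takeWhile (fun d => !pvIsSep d) rest := by
  rw [List.takeWhile_map, pvComp_eq]
  exact pvMapSub_id _ (fun d hd => by
    have := List.mem_takeWhile_imp hd
    simpa using this)

theorem pvDrop_eq (rest : List Char) :
    List.dropWhile (fun d => !PySem.Chars.isspace d) (List.map pvSub rest)
      = List.map pvSub (List.dropWhile (fun d => !pvIsSep d) rest) := by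
  rw [List.dropWhile_map, pvComp_eq]

theorem pvFind_splitTok_map (cs : List Char) :
    (pvSplitTok (cs.map pvSub)).find? pvPredC = pvScanB cs := by
  fun_induction pvScanB cs with
  | case1 => simp [pvSplitTok]
  | case2 c rest hsep ih =>
    rw [List.map_cons, pvSplitTok]
    rw [if_pos (by rw [pvIsspace_sub]; exact hsep)]
    exact ih
  | case3 c rest hsep tok hcond =>
    rw [List.map_cons, pvSplitTok]
    have hsep' : pvIsSep c = false := by simpa using hsep
    rw [if_neg (by rw [pvIsspace_sub, hsep']; exact Bool.false_ne_true)]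
    rw [pvTok_eq, pvSub_id c hsep']
    rw [List.find?_cons_of_pos (p := pvPredC) (by exact hcond)]
  | case4 c rest hsep tok hcond ih =>
    have hsep' : pvIsSep c = false := by simpa using hsep
    rw [List.map_cons, pvSplitTok]
    rw [if_neg (by rw [pvIsspace_sub, hsep']; exact Bool.false_ne_true)]
    rw [pvTok_eq, pvSub_id c hsep']
    rw [List.find?_cons_of_neg (p := pvPredC) (by simpa [pvPredC] using hcond)]
    rw [pvDrop_eq]
    exact ih

theorem pvPrefix_takeWhile {t l : List Char} {p : Char → Bool}
    (h : t <+: l) (hall : ∀ c ∈ t, p c = true) : t <+: l.takeWhile p := by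
  induction t generalizing l with
  | nil => simp
  | cons x xs ih =>
    obtain ⟨r, hr⟩ := h
    subst hr
    rw [List.cons_append, List.takeWhile_cons, if_pos (hall x (by simp))]
    exact List.cons_prefix_cons.mpr ⟨rfl, ih (List.prefix_append xs r) (fun c hc => hall c (by simp [hc]))⟩

theorem pvScanB_none_no_http (cs : List Char) (h : pvScanB cs = none) :
    pvPredC cs = false := by
  cases cs with
  | nil => decide
  | cons c rest =>
    by_cases hp : pvPredC (c :: rest) = true
    · exfalso
      have hc : c = 'h' := by
        rcases Bool.or_eq_true_iff.mp hp with h' | h'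
        · rw [show ("http://".toList) = ['h','t','t','p',':','/','/'] from rfl] at h'
          exact (List.cons_prefix_cons.mp ((PySem.Chars.startswith_iff _ _).mp h')).1.symm
        · rw [show ("https://".toList) = ['h','t','t','p','s',':','/','/'] from rfl] at h'
          exact (List.cons_prefix_cons.mp ((PySem.Chars.startswith_iff _ _).mp h')).1.symm
      have hsep : pvIsSep c = false := by rw [hc]; decide
      rw [pvScanB, if_neg (by simp [hsep])] at h
      have h7 : "http://".toList = ['h','t','t','p',':','/','/'] := rfl
      have h8 : "https://".toList = ['h','t','t','p','s',':','/','/'] := rfl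
      have hptok : pvPredC (c :: rest.takeWhile (fun d => !pvIsSep d)) = true := by
        rcases Bool.or_eq_true_iff.mp hp with h' | h'
        · rw [h7] at h'
          have := List.cons_prefix_cons.mp ((PySem.Chars.startswith_iff _ _).mp h')
          refine Bool.or_eq_true_iff.mpr (Or.inl ((PySem.Chars.startswith_iff _ _).mpr ?_))
          rw [h7]
          exact List.cons_prefix_cons.mpr ⟨this.1, pvPrefix_takeWhile this.2 (by intro c hc; fin_cases hc <;> rfl)⟩
        · rw [h8] at h'
          have := List.cons_prefix_cons.mp ((PySem.Chars.startswith_iff _ _).mp h')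
          refine Bool.or_eq_true_iff.mpr (Or.inr ((PySem.Chars.startswith_iff _ _).mpr ?_))
          rw [h8]
          exact List.cons_prefix_cons.mpr ⟨this.1, pvPrefix_takeWhile this.2 (by intro c hc; fin_cases hc <;> rfl)⟩
      rw [if_pos (by simpa [pvPredC] using hptok)] at h
      exact Option.some_ne_none _ h
    · simpa using hp

theorem pvScanB_some_nosep (cs t : List Char) (h : pvScanB cs = some t) :
    ∀ c ∈ t, pvIsSep c = false := by
  fun_induction pvScanB cs with
  | case1 => simp at h
  | case2 c rest hsep ih => exact ih h
  | case3 c rest hsep tok hcond =>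
    have ht : t = c :: rest.takeWhile (fun d => !pvIsSep d) := by
      simpa using h.symm
    subst ht
    intro x hx
    rcases List.mem_cons.mp hx with rfl | hx'
    · simpa using hsep
    · simpa using List.mem_takeWhile_imp hx'
  | case4 c rest hsep tok hcond ih => exact ih h

theorem pvDropWhile_all_false {p : Char → Bool} (l : List Char)
    (h : ∀ c ∈ l, p c = false) : l.dropWhile p = l := by
  cases l with
  | nil => rfl
  | cons x xs => rw [List.dropWhile_cons, if_neg (by simp [h x (by simp)])]

theorem pvStrip_nospace (t : List Char) (h : ∀ c ∈ t, PySem.Chars.isspace c = false) :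
    PySem.Chars.strip t = t := by
  unfold PySem.Chars.strip PySem.Chars.lstrip PySem.Chars.rstrip
  rw [pvDropWhile_all_false t h]
  rw [pvDropWhile_all_false t.reverse (fun c hc => h c (List.mem_reverse.mp hc))]
  exact List.reverse_reverse t

theorem pvLoopA_eq_find (ts : List String) :
    pvLoopA ts = (ts.find? (fun t => PySem.Str.startswith t "http://"
      || PySem.Str.startswith t "https://")).map PySem.Str.strip := by
  induction ts with
  | nil => rfl
  | cons t ts ih =>
    rw [pvLoopA, List.find?_cons]
    by_cases h : (PySem.Str.startswith t "http://" || PySem.Str.startswith t "https://") = true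
    · rw [if_pos h, h]; rfl
    · have hb : (PySem.Str.startswith t "http://" || PySem.Str.startswith t "https://") = false :=
        by simpa using h
      rw [if_neg h, hb, ih]

theorem pvCore (raw : String) :
    pvFallbackA raw (pvLoopA (PySem.Str.split₀ (PySem.Str.replace raw "\"" " ")))
    = (pvScanB raw.toList).map String.ofList := by
  have hq : ("\"" : String).toList = ['"'] := rfl
  have hsp : (" " : String).toList = [' '] := rfl
  have hchain : PySem.Chars.split₀ ((PySem.Str.replace raw "\"" " ").toList)
      = pvSplitTok (raw.toList.map pvSub) := by
    rw [PySem.Str.toList_replace, hq, hsp, pvReplace_eq_map, pvSplit₀_eq_splitTok]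
  have hA : pvLoopA (PySem.Str.split₀ (PySem.Str.replace raw "\"" " "))
      = ((pvSplitTok (raw.toList.map pvSub)).find? pvPredC).map (fun t => PySem.Str.strip (String.ofList t)) := by
    rw [pvLoopA_eq_find, PySem.Str.split₀, List.find?_map, ← hchain]
    have : ((fun t => PySem.Str.startswith t "http://" || PySem.Str.startswith t "https://") ∘ String.ofList) = pvPredC := by
      funext t
      simp [Function.comp, pvPredC, PySem.Str.startswith_eq]
    rw [this, Option.map_map]
    rfl
  rw [hA, pvFind_splitTok_map]
  cases hscan : pvScanB raw.toList with
  | some t =>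
    simp only [Option.map_some]
    have hnosep := pvScanB_some_nosep _ _ hscan
    have hstrip : PySem.Chars.strip t = t :=
      pvStrip_nospace t (fun c hc => by
        have := hnosep c hc
        revert this
        simp [pvIsSep]
        exact fun h _ => h)
    rw [pvFallbackA]
    rw [show PySem.Str.strip (String.ofList t) = String.ofList t from by
      rw [PySem.Str.strip]; rw [String.toList_ofList, hstrip]]
  | none =>
    simp only [Option.map_none]
    rw [pvFallbackA]
    have hf := pvScanB_none_no_http _ hscan
    rw [if_neg (by
      simp only [PySem.Str.startswith_eq]
      simpa [pvPredC] using hf)]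

-- ===== VERDICT (by name: the statement is the Claim_ definition above) =====
theorem extract_stream_url_from_cmd_py_spec : Claim_equal_extract_stream_url_from_cmd_py := by
  intro cmd _
  unfold Spec_extract_stream_url_from_cmd_py
  unfold extract_stream_url_from_cmd_py extract_stream_url_from_cmd_py_alt
  split_ifs with h
  · rfl
  · exact pvCore _
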